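-- pv_equiv track=rewrite | github.com/NEXTLab-ZJU/wuyun | utils/add_chord_bass_track.py | move_on_clock
-- ===== SOURCE A (Python) =====
-- def get_move_step(root,calculate_list):
--
--     for i,pitch_class in enumerate(calculate_list[0]):
--         if pitch_class == root :
--             move_step = i
--             break
--     return move_step
--
-- def move_on_clock(root, chord_tones):
--
--     calculate_list = [[(j + i) % 12 for j in range(12)] for i in range(12)]
--     transfer_result = set()
--
--     for tone in list(chord_tones):
--         move_step = get_move_step(root,calculate_list)
--         new_tone = calculate_list[tone][move_step]
--         transfer_result.add(new_tone)
--
--     return transfer_result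
-- ===== SOURCE B (Python) =====
-- def move_on_clock(root, chord_tones):
--     shifted = [(root + pc) % 12 for pc in range(12)]
--     return {shifted[tone] for tone in chord_tones}
-- ===== Notes on version B (the rewrite author's own statement) =====
-- stated objective: simpler
-- what changed: B drops A's 12x12 modular-addition table and the get_move_step index scan: it computes the root-transposed pitch-class row directly as [(root + pc) % 12 for pc in range(12)] and maps each chord tone through it in one comprehension.
import Mathlib
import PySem

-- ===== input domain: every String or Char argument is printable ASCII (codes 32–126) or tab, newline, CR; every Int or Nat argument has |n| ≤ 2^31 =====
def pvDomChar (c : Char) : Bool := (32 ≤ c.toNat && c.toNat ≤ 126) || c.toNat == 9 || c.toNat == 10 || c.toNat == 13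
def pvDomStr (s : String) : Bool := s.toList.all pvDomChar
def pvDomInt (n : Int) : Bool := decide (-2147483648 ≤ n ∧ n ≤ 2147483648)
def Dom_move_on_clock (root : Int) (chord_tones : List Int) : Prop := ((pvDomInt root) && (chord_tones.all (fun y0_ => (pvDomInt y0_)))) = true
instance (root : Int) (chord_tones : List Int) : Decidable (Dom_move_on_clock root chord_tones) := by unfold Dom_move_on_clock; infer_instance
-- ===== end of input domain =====

-- B drops A's 12x12 table and the get_move_step scan: it builds the root-transposed pitch-class row [(root + pc) % 12 for pc in range(12)] once and indexes each chord tone into it (simpler; same asymptotic cost).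


-- ===== PORT A =====
-- get_move_step: scans row 0 of the table for root; none = Python's UnboundLocalError (no break hit)
def get_move_step (root : Int) (calculate_list : List (List Int)) : Option Int :=
  let row0 := (PySem.List.pyGet? calculate_list 0).getD []
  (PySem.List.enumerate row0).foldl
    (fun acc p => match acc with
      | some _ => acc
      | none => if p.2 == root then some p.1 else none) none

-- literal port of A; Option models the raises (IndexError / UnboundLocalError); none-case result is junk, excluded by Pre_
def move_on_clock (root : Int) (chord_tones : List Int) : List Int :=
  let calculate_list := (PySem.List.pyRange 0 12 1).map (fun i =>
      (PySem.List.pyRange 0 12 1).map (fun j => PySem.Int.mod (j + i) 12))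
  let res : Option (PySem.Set Int) := chord_tones.foldl
    (fun acc tone => match acc with
      | none => none
      | some s =>
        match get_move_step root calculate_list with
        | none => none
        | some move_step =>
          match PySem.List.pyGet? calculate_list tone with
          | none => none
          | some row =>
            match PySem.List.pyGet? row move_step with
            | none => none
            | some new_tone => some (PySem.Set.add s new_tone))
    (some PySem.Set.empty)
  res.getD []

-- ===== PORT B =====
-- B: build the root-transposed pitch-class row once, then index each chord tone into it
-- (Python's negative indexing handles tones -12..-1); none = IndexError, excluded by Pre_
def move_on_clock_alt (root : Int) (chord_tones : List Int) : List Int :=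
  let shifted := (PySem.List.pyRange 0 12 1).map (fun pc => PySem.Int.mod (root + pc) 12)
  let res : Option (PySem.Set Int) := chord_tones.foldl
    (fun acc tone => match acc with
      | none => none
      | some s =>
        match PySem.List.pyGet? shifted tone with
        | none => none
        | some new_tone => some (PySem.Set.add s new_tone))
    (some PySem.Set.empty)
  res.getD []

-- ===== PRECONDITION & SPEC =====
-- Pre_ excludes exactly the inputs where A raises: with a nonempty chord list, a root outside 0..11
-- (UnboundLocalError in get_move_step) or a tone outside -12..11 (IndexError).
def Pre_move_on_clock (root : Int) (chord_tones : List Int) : Prop :=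
  chord_tones = [] ∨ ((0 ≤ root ∧ root < 12) ∧ ∀ t ∈ chord_tones, -12 ≤ t ∧ t < 12)
instance (root : Int) (chord_tones : List Int) : Decidable (Pre_move_on_clock root chord_tones) := by unfold Pre_move_on_clock; infer_instance

def pvWitness_move_on_clock : Int × List Int := (7, [0, 4, 7])

def Spec_move_on_clock (root : Int) (chord_tones : List Int) (out : List Int) : Prop := out = move_on_clock_alt root chord_tones
instance (root : Int) (chord_tones : List Int) (out : List Int) : Decidable (Spec_move_on_clock root chord_tones out) := by unfold Spec_move_on_clock; infer_instance

-- ===== CLAIM (what is proved, stated in full; the proofs are below) =====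
def Claim_equal_move_on_clock : Prop := ∀ (root : Int) (chord_tones : List Int), Dom_move_on_clock root chord_tones → Pre_move_on_clock root chord_tones → Spec_move_on_clock root chord_tones (move_on_clock root chord_tones)

-- ===== LEMMAS AND PROOFS =====

-- the constant table A builds
def pvCL : List (List Int) :=
  (PySem.List.pyRange 0 12 1).map (fun i =>
      (PySem.List.pyRange 0 12 1).map (fun j => PySem.Int.mod (j + i) 12))

lemma pvGms (root : Int) (h0 : 0 ≤ root) (h1 : root < 12) :
    get_move_step root pvCL = some root := by
  interval_cases root <;> decide

lemma pvLookup (root tone : Int) (h0 : 0 ≤ root) (h1 : root < 12)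
    (h2 : -12 ≤ tone) (h3 : tone < 12) :
    (PySem.List.pyGet? pvCL tone).bind (fun row => PySem.List.pyGet? row root)
      = some (PySem.Int.mod (tone + root) 12) := by
  interval_cases tone <;> interval_cases root <;> decide

lemma pvFold (root : Int) (h0 : 0 ≤ root) (h1 : root < 12) :
    ∀ (l : List Int) (s : PySem.Set Int), (∀ t ∈ l, -12 ≤ t ∧ t < 12) →
    l.foldl
      (fun acc tone => match acc with
        | none => none
        | some s =>
          match get_move_step root pvCL with
          | none => none
          | some move_step =>
            match PySem.List.pyGet? pvCL tone with
            | none => none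
            | some row =>
              match PySem.List.pyGet? row move_step with
              | none => none
              | some new_tone => some (PySem.Set.add s new_tone))
      (some s)
    = some (l.foldl (fun s tone => PySem.Set.add s (PySem.Int.mod (tone + root) 12)) s) := by
  intro l
  induction l with
  | nil => intro s _; rfl
  | cons t l ih =>
    intro s hb
    obtain ⟨ht, hl⟩ := List.forall_mem_cons.mp hb
    have hlk := pvLookup root t h0 h1 ht.1 ht.2
    have hstep : (match some s with
        | none => none
        | some s =>
          match get_move_step root pvCL with
          | none => none
          | some move_step =>
            match PySem.List.pyGet? pvCL t with
            | none => none
            | some row =>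
              match PySem.List.pyGet? row move_step with
              | none => none
              | some new_tone => some (PySem.Set.add s new_tone))
        = some (PySem.Set.add s (PySem.Int.mod (t + root) 12)) := by
      simp only [pvGms root h0 h1]
      cases hrow : PySem.List.pyGet? pvCL t with
      | none => simp [hrow] at hlk
      | some row =>
        simp only [hrow, Option.bind] at hlk ⊢
        rw [hlk]
    rw [List.foldl_cons, List.foldl_cons, hstep]
    exact ih _ hl

lemma pvLookupB (root tone : Int) (h0 : 0 ≤ root) (h1 : root < 12)
    (h2 : -12 ≤ tone) (h3 : tone < 12) :
    PySem.List.pyGet? ((PySem.List.pyRange 0 12 1).map (fun pc => PySem.Int.mod (root + pc) 12)) tone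
      = some (PySem.Int.mod (tone + root) 12) := by
  interval_cases tone <;> interval_cases root <;> decide

lemma pvFoldB (root : Int) (h0 : 0 ≤ root) (h1 : root < 12) :
    ∀ (l : List Int) (s : PySem.Set Int), (∀ t ∈ l, -12 ≤ t ∧ t < 12) →
    l.foldl
      (fun acc tone => match acc with
        | none => none
        | some s =>
          match PySem.List.pyGet? ((PySem.List.pyRange 0 12 1).map (fun pc => PySem.Int.mod (root + pc) 12)) tone with
          | none => none
          | some new_tone => some (PySem.Set.add s new_tone))
      (some s)
    = some (l.foldl (fun s tone => PySem.Set.add s (PySem.Int.mod (tone + root) 12)) s) := by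
  intro l
  induction l with
  | nil => intro s _; rfl
  | cons t l ih =>
    intro s hb
    obtain ⟨ht, hl⟩ := List.forall_mem_cons.mp hb
    rw [List.foldl_cons, List.foldl_cons, pvLookupB root t h0 h1 ht.1 ht.2]
    exact ih _ hl

-- ===== VERDICT (by name: the statement is the Claim_ definition above) =====
theorem move_on_clock_spec : Claim_equal_move_on_clock := by
  intro root chord_tones _ hpre
  unfold Spec_move_on_clock move_on_clock move_on_clock_alt
  rcases hpre with h | ⟨⟨h0, h1⟩, hb⟩
  · subst h; rfl
  · show ((chord_tones.foldl _ (some PySem.Set.empty)).getD [] : List Int)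
      = (chord_tones.foldl _ (some PySem.Set.empty)).getD []
    rw [show ((PySem.List.pyRange 0 12 1).map (fun i =>
      (PySem.List.pyRange 0 12 1).map (fun j => PySem.Int.mod (j + i) 12))) = pvCL from rfl]
    rw [pvFold root h0 h1 chord_tones PySem.Set.empty hb,
        pvFoldB root h0 h1 chord_tones PySem.Set.empty hb]
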